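-- pv_equiv track=rewrite | github.com/pypi-data/pypi-mirror-310 | packages/orcalib/orcalib-0.0.76.tar.gz/orcalib-0.0.76/orcalib/_orca_utils.py | find_suffixes_in_sequence
-- ===== SOURCE A (Python) =====
-- def compute_lps_array(pattern) -> list[int]:
--     """Compute the longest prefix that is also a suffix (lps) array used in KMP algorithm.
--
--     Args:
--         pattern: Pattern
--
--     Returns:
--         lps array
--     """
--     lps = [0] * len(pattern)
--     length = 0  # length of the previous longest prefix suffix
--
--     # Loop calculates lps[i] for i = 1 to M-1
--     i = 1
--     while i < len(pattern):
--         if pattern[i] == pattern[length]: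
--             length += 1
--             lps[i] = length
--             i += 1
--         else:
--             if length != 0:
--                 length = lps[length - 1]
--                 # Note that we do not increment i here
--             else:
--                 lps[i] = 0
--                 i += 1
--
--     return lps
--
-- def find_suffixes_in_sequence(S, M, S_min, S_max) -> list[tuple[int, int, str]]:
--     """Find the starting indexes where the suffixes of S of lengths between S_min and S_max are contained in M.
--
--     Args:
--         S: Sequence
--         M: Subsequence
--         S_min: Minimum length of suffix
--         S_max: Maximum length of suffix
--     """
--     occurrences = []
--
--     # Iterate through the range of lengths for suffixes of S
--     for suffix_length in range(S_min, S_max + 1):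
--         # Get the suffix of S of length suffix_length
--         suffix = S[-suffix_length:]
--
--         # Preprocess the suffix to get the lps array
--         lps = compute_lps_array(suffix)
--
--         # Start searching for the suffix in M
--         i = j = 0  # i is index for M, j is index for suffix
--         while i < len(M):
--             if suffix[j] == M[i]:
--                 i += 1
--                 j += 1
--
--             if j == len(suffix):
--                 # If we found a complete match, record the index where it starts in M
--                 if i < len(M):
--                     occurrences.append((i - j, len(suffix), M[i]))
--                 else:
--                     occurrences.append((i - j, len(suffix), None))
--                 j = lps[j - 1]
--
--             # Mismatch after j matches
--             elif i < len(M) and suffix[j] != M[i]: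
--                 # Do not match lps[0..lps[j-1]] characters, they will match anyway
--                 if j != 0:
--                     j = lps[j - 1]
--                 else:
--                     i += 1
--
--     return occurrences
-- ===== SOURCE B (Python) =====
-- def find_suffixes_in_sequence(S, M, S_min, S_max):
--     """Naive scan: for each requested suffix of S, test every start position in M
--     directly with a slice comparison (no KMP preprocessing)."""
--     occurrences = []
--     for suffix_length in range(S_min, S_max + 1):
--         suffix = S[-suffix_length:]
--         k = len(suffix)
--         for start in range(len(M) - k + 1):
--             if M[start:start + k] == suffix:
--                 nxt = M[start + k] if start + k < len(M) else None
--                 occurrences.append((start, k, nxt))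
--     return occurrences
-- ===== Notes on version B (the rewrite author's own statement) =====
-- stated objective: simpler
-- what changed: A runs a hand-written KMP (failure-function preprocessing plus a stateful matcher loop) for each suffix length; B replaces all of that with a direct naive scan that tests every start position with one slice comparison.
-- outside the precondition, e.g. on find_suffixes_in_sequence('', '', 0, 0): A returns [], B returns [(0, 0, None)]
import Mathlib
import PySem

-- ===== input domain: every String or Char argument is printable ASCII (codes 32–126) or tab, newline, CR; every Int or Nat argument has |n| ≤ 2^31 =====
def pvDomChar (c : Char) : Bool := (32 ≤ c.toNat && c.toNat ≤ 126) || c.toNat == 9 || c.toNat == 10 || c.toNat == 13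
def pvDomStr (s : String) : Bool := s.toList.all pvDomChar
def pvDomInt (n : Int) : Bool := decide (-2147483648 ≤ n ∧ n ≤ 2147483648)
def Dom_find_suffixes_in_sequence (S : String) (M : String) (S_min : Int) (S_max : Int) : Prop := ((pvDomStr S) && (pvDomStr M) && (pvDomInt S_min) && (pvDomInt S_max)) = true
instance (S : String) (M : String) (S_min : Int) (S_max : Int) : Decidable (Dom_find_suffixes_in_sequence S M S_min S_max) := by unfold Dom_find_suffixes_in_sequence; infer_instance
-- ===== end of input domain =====

-- B replaces A's per-suffix hand-written KMP (failure table + stateful matcher) by a plain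
-- naive scan testing each start position with one slice comparison (objective: simpler; not faster).

-- ===== PORT A =====
-- while-loop of compute_lps_array; the 'min … (length-1)' is a totality guard only:
-- on reachable states lps[length-1] ≤ length-1 (proved below), so it is the identity.
def computeLpsLoop (pattern : List Char) (lps : List Nat) (length i : Nat) : List Nat :=
  if _h : i < pattern.length then
    if pattern[i]? = pattern[length]? then
      computeLpsLoop pattern (lps.set i (length + 1)) (length + 1) (i + 1)
    else if length ≠ 0 then
      computeLpsLoop pattern lps (min (lps.getD (length - 1) 0) (length - 1)) i
    else
      computeLpsLoop pattern (lps.set i 0) 0 (i + 1)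
  else lps
termination_by 2 * (pattern.length - i) + length
decreasing_by
  · omega
  · have := Nat.min_le_right (lps.getD (length - 1) 0) (length - 1); omega
  · omega

def compute_lps_array (pattern : List Char) : List Nat :=
  computeLpsLoop pattern (List.replicate pattern.length 0) 0 1

-- while-loop of the KMP search; the leading 'suffix.length = 0' test and the 'min … ' wrappers
-- are totality guards only (Python raises IndexError on an empty suffix with nonempty M — excluded
-- by Pre_ — and on reachable states lps[q] ≤ q, so min is the identity).
def kmpLoop (suffix M : List Char) (lps : List Nat) (i j : Nat)
    (acc : List (Int × Int × Option String)) : List (Int × Int × Option String) :=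
  if suffix.length = 0 then acc
  else if _h : i < M.length then
    if suffix[j]? = M[i]? then
      -- i += 1; j += 1
      if j + 1 = suffix.length then
        kmpLoop suffix M lps (i + 1) (min (lps.getD j 0) j)
          (acc ++ [(((i : Int) + 1) - ((j : Int) + 1), (suffix.length : Int),
                    (M[i + 1]?).map (fun c => String.ofList [c]))])
      else if i + 1 < M.length ∧ ¬ suffix[j + 1]? = M[i + 1]? then
        kmpLoop suffix M lps (i + 1) (min (lps.getD j 0) j) acc
      else
        kmpLoop suffix M lps (i + 1) (j + 1) acc
    else
      if j = suffix.length then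
        kmpLoop suffix M lps i (min (lps.getD (j - 1) 0) (j - 1))
          (acc ++ [((i : Int) - (j : Int), (suffix.length : Int),
                    (M[i]?).map (fun c => String.ofList [c]))])
      else if j ≠ 0 then
        kmpLoop suffix M lps i (min (lps.getD (j - 1) 0) (j - 1)) acc
      else
        kmpLoop suffix M lps (i + 1) 0 acc
  else acc
termination_by 2 * (M.length - i) + j
decreasing_by
  · have := Nat.min_le_right (lps.getD j 0) j; omega
  · have := Nat.min_le_right (lps.getD j 0) j; omega
  · omega
  · have := Nat.min_le_right (lps.getD (j - 1) 0) (j - 1); omega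
  · have := Nat.min_le_right (lps.getD (j - 1) 0) (j - 1); omega
  · omega

def find_suffixes_in_sequence (S : String) (M : String) (S_min : Int) (S_max : Int) :
    List (Int × Int × Option String) :=
  (PySem.List.pyRange S_min (S_max + 1) 1).foldl (fun occurrences suffix_length =>
    let suffix := PySem.List.slice S.toList (some (-suffix_length)) none
    let lps := compute_lps_array suffix
    kmpLoop suffix M.toList lps 0 0 occurrences) []

-- ===== PORT B =====
def find_suffixes_in_sequence_alt (S : String) (M : String) (S_min : Int) (S_max : Int) :
    List (Int × Int × Option String) :=
  (PySem.List.pyRange S_min (S_max + 1) 1).foldl (fun occurrences suffix_length =>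
    let suffix := PySem.List.slice S.toList (some (-suffix_length)) none
    let k := suffix.length
    (PySem.List.pyRange 0 ((M.toList.length : Int) - (k : Int) + 1) 1).foldl
      (fun occ start =>
        if PySem.List.slice M.toList (some start) (some (start + (k : Int))) = suffix then
          occ ++ [(start, (k : Int),
                   if start + (k : Int) < (M.toList.length : Int) then
                     (PySem.List.pyGet? M.toList (start + (k : Int))).map (fun c => String.ofList [c])
                   else none)]
        else occ) occurrences) []

-- ===== PRECONDITION & SPEC =====
-- Pre_ excludes exactly the inputs where some requested suffix of S is empty: there A raises
-- IndexError whenever M is nonempty, and on the remaining corner (M empty) A's [] (its search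
-- loop is never entered) versus B's match of the empty pattern in the empty text are both
-- defensible readings of an unspecified corner.
def Pre_find_suffixes_in_sequence (S : String) (M : String) (S_min : Int) (S_max : Int) : Prop :=
  S_max < S_min ∨ (S ≠ "" ∧ -(S.toList.length : Int) < S_min)
instance (S : String) (M : String) (S_min : Int) (S_max : Int) :
    Decidable (Pre_find_suffixes_in_sequence S M S_min S_max) := by
  unfold Pre_find_suffixes_in_sequence; infer_instance

def pvWitness_find_suffixes_in_sequence : String × String × Int × Int := ("ab", "abab", 1, 2)

def Spec_find_suffixes_in_sequence (S : String) (M : String) (S_min : Int) (S_max : Int)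
    (out : List (Int × Int × Option String)) : Prop :=
  out = find_suffixes_in_sequence_alt S M S_min S_max
instance (S : String) (M : String) (S_min : Int) (S_max : Int)
    (out : List (Int × Int × Option String)) :
    Decidable (Spec_find_suffixes_in_sequence S M S_min S_max out) := by
  unfold Spec_find_suffixes_in_sequence; infer_instance

-- ===== CLAIM (what is proved, stated in full; the proofs are below) =====
def Claim_equal_find_suffixes_in_sequence : Prop :=
  ∀ (S : String) (M : String) (S_min : Int) (S_max : Int),
    Dom_find_suffixes_in_sequence S M S_min S_max →
    Pre_find_suffixes_in_sequence S M S_min S_max →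
    Spec_find_suffixes_in_sequence S M S_min S_max (find_suffixes_in_sequence S M S_min S_max)

-- ===== LEMMAS AND PROOFS =====

-- π(q): the length of the longest proper border of p.take q (the KMP failure function).
def pvPi (p : List Char) (q : Nat) : Nat :=
  Nat.findGreatest (fun k => p.take k <:+ p.take q) (q - 1)

-- the output entry for a match of p starting at s in m
def pvEntry (p m : List Char) (s : Nat) : Int × Int × Option String :=
  ((s : Int), (p.length : Int), (m[s + p.length]?).map (fun c => String.ofList [c]))

-- matches of p in m whose end position exceeds i, in increasing start order
def endsAfter (p m : List Char) (i : Nat) : List (Int × Int × Option String) :=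
  (List.range (m.length + 1 - p.length)).filterMap (fun s =>
    if i < s + p.length ∧ (m.drop s).take p.length = p then some (pvEntry p m s) else none)

lemma pvPi_le (p : List Char) (q : Nat) : pvPi p q ≤ q - 1 :=
  Nat.findGreatest_le _

lemma pvPi_suffix (p : List Char) (q : Nat) : p.take (pvPi p q) <:+ p.take q := by
  have h0 : (fun k => p.take k <:+ p.take q) 0 := by simp
  exact Nat.findGreatest_spec (P := fun k => p.take k <:+ p.take q) (Nat.zero_le _) h0

lemma le_pvPi (p : List Char) (q k : Nat) (hk : k ≤ q - 1)
    (h : p.take k <:+ p.take q) : k ≤ pvPi p q :=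
  Nat.le_findGreatest hk h

-- suffixes of the same list compare by length
lemma suffix_of_suffix_le (x y z : List Char) (hx : x <:+ z) (hy : y <:+ z)
    (h : x.length ≤ y.length) : x <:+ y :=
  List.suffix_of_suffix_length_le hx hy h

lemma concat_suffix_concat (x y : List Char) (a b : Char) :
    x ++ [a] <:+ y ++ [b] ↔ x <:+ y ∧ a = b := by
  rw [← List.reverse_prefix]
  simp only [List.reverse_append, List.reverse_singleton, List.singleton_append,
    List.cons_prefix_cons, List.reverse_prefix]
  tauto

lemma take_succ_suffix (p m : List Char) (k i : Nat) (hk : k < p.length) (hi : i < m.length) :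
    p.take (k + 1) <:+ m.take (i + 1) ↔ (p.take k <:+ m.take i ∧ p[k]? = m[i]?) := by
  rw [List.take_succ, List.take_succ, List.getElem?_eq_getElem hk, List.getElem?_eq_getElem hi]
  simp only [Option.toList_some, concat_suffix_concat, Option.some_inj]

lemma match_iff (p m : List Char) (s : Nat) (h : s + p.length ≤ m.length) :
    (m.drop s).take p.length = p ↔ p <:+ m.take (s + p.length) := by
  have hsplit : m.take (s + p.length) = m.take s ++ (m.drop s).take p.length := List.take_add ..
  constructor
  · intro hm
    exact ⟨m.take s, by rw [hsplit, hm]⟩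
  · intro hs
    have hd := List.suffix_iff_eq_drop.mp hs
    have hlen : (m.take (s + p.length)).length = s + p.length := by
      simp; omega
    rw [hlen, Nat.add_sub_cancel] at hd
    have hlen2 : (m.take s).length = s := by simp; omega
    have key : (m.take s ++ (m.drop s).take p.length).drop (m.take s).length =
        (m.drop s).take p.length := List.drop_left
    rw [hlen2] at key
    rw [← key, ← hsplit]
    exact hd.symm

lemma endsAfter_last (p m : List Char) : endsAfter p m m.length = [] := by
  unfold endsAfter
  rw [List.filterMap_eq_nil_iff]
  intro s hs
  rw [List.mem_range] at hs
  rw [if_neg]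
  rintro ⟨h1, -⟩
  omega

lemma endsAfter_step_none (p m : List Char) (i : Nat)
    (h : ¬ p <:+ m.take (i + 1)) : endsAfter p m i = endsAfter p m (i + 1) := by
  unfold endsAfter
  apply List.filterMap_congr
  intro s hs
  rw [List.mem_range] at hs
  by_cases hm : (m.drop s).take p.length = p
  · by_cases h1 : i + 1 < s + p.length
    · rw [if_pos ⟨by omega, hm⟩, if_pos ⟨h1, hm⟩]
    · have h2 : s + p.length ≠ i + 1 := by
        intro h2
        exact h (h2 ▸ (match_iff p m s (by omega)).mp hm)
      rw [if_neg (by rintro ⟨hh, -⟩; omega), if_neg (by rintro ⟨hh, -⟩; omega)]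
  · rw [if_neg (by rintro ⟨-, hh⟩; exact hm hh), if_neg (by rintro ⟨-, hh⟩; exact hm hh)]

lemma endsAfter_step_some (p m : List Char) (i : Nat)
    (hi : i < m.length) (h : p <:+ m.take (i + 1)) :
    endsAfter p m i = pvEntry p m (i + 1 - p.length) :: endsAfter p m (i + 1) := by
  have hple : p.length ≤ i + 1 := by
    have := h.length_le
    simp only [List.length_take] at this
    omega
  set s₀ := i + 1 - p.length with hs₀
  have hs0p : s₀ + p.length = i + 1 := by omega
  set n := m.length + 1 - p.length with hn
  have hs0n : s₀ + 1 ≤ n := by omega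
  have hsplitn : n = (s₀ + 1) + (n - (s₀ + 1)) := by omega
  have hmatch : (m.drop s₀).take p.length = p :=
    (match_iff p m s₀ (by omega)).mpr (hs0p ▸ h)
  unfold endsAfter
  rw [← hn, hsplitn, List.range_add, List.range_succ, List.filterMap_append,
    List.filterMap_append, List.filterMap_append, List.filterMap_append]
  have hpre : ∀ (f : Nat → Option (Int × Int × Option String)),
      (∀ s, s < s₀ → f s = none) → (List.range s₀).filterMap f = [] := by
    intro f hf
    rw [List.filterMap_eq_nil_iff]
    intro s hs
    exact hf s (List.mem_range.mp hs)
  rw [hpre _ (fun s hs => by rw [if_neg]; rintro ⟨h1, -⟩; omega),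
      hpre _ (fun s hs => by rw [if_neg]; rintro ⟨h1, -⟩; omega)]
  have h1 : (List.filterMap (fun s => if i < s + p.length ∧ (m.drop s).take p.length = p
      then some (pvEntry p m s) else none) [s₀]) = [pvEntry p m s₀] := by
    simp only [List.filterMap_cons, List.filterMap_nil]
    rw [if_pos ⟨by omega, hmatch⟩]
  have h2 : (List.filterMap (fun s => if i + 1 < s + p.length ∧ (m.drop s).take p.length = p
      then some (pvEntry p m s) else none) [s₀]) = [] := by
    simp only [List.filterMap_cons, List.filterMap_nil]
    rw [if_neg]
    rintro ⟨hh, -⟩; omega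
  rw [h1, h2, List.filterMap_map, List.filterMap_map, List.nil_append, List.nil_append,
    List.nil_append, List.singleton_append]
  congr 1
  apply List.filterMap_congr
  intro t ht
  simp only [Function.comp_apply]
  by_cases hm : (m.drop (s₀ + 1 + t)).take p.length = p
  · rw [if_pos ⟨by omega, hm⟩, if_pos ⟨by omega, hm⟩]
  · rw [if_neg (by rintro ⟨-, hh⟩; exact hm hh), if_neg (by rintro ⟨-, hh⟩; exact hm hh)]

lemma lpsLoop_correct (p : List Char) (lps : List Nat) (length i : Nat) :
    lps.length = p.length →
    (∀ q, q < i → q < p.length → lps.getD q 0 = pvPi p (q + 1)) →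
    length < i →
    p.take length <:+ p.take i →
    (∀ k, length < k → k < i → p.take k <:+ p.take i → ¬ (p[k]? = p[i]?)) →
    ∀ q, q < p.length → (computeLpsLoop p lps length i).getD q 0 = pvPi p (q + 1) := by
  induction lps, length, i using computeLpsLoop.induct p with
  | case1 lps length i hi heq ih =>
    intro h1 h2 h3 h4 h5 q hq
    rw [computeLpsLoop, dif_pos hi, if_pos heq]
    have hlp : length < p.length := by
      have h' := heq
      rw [List.getElem?_eq_getElem hi] at h'
      exact (List.getElem?_eq_some_iff.mp h'.symm).1
    have hmax : ∀ k, k ≤ i → p.take k <:+ p.take (i + 1) → k ≤ length + 1 := by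
      intro k hk hsuf
      match k with
      | 0 => omega
      | k' + 1 =>
        have hk' : k' < p.length := by omega
        obtain ⟨hs', hch⟩ := (take_succ_suffix p p k' i hk' hi).mp hsuf
        by_contra hgt
        exact h5 k' (by omega) (by omega) hs' hch
    have h4' : p.take (length + 1) <:+ p.take (i + 1) :=
      (take_succ_suffix p p length i hlp hi).mpr ⟨h4, heq.symm⟩
    have hpi : pvPi p (i + 1) = length + 1 := by
      have le1 : length + 1 ≤ pvPi p (i + 1) := le_pvPi p (i + 1) (length + 1) (by omega) h4'
      have le2 : pvPi p (i + 1) ≤ length + 1 :=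
        hmax _ (by have := pvPi_le p (i + 1); omega) (pvPi_suffix p (i + 1))
      omega
    refine ih (by simp [h1]) ?_ (by omega) h4' ?_ q hq
    · intro q' hq1 hq2
      by_cases hqi : q' = i
      · subst hqi
        rw [List.getD_eq_getElem?_getD, List.getElem?_set_self (by omega), Option.getD_some, hpi]
      · rw [List.getD_eq_getElem?_getD, List.getElem?_set_ne (by omega),
          ← List.getD_eq_getElem?_getD]
        exact h2 q' (by omega) hq2
    · intro k hk1 hk2 hsuf _
      exact absurd (hmax k (by omega) hsuf) (by omega)
  | case2 lps length i hi heq hne ih =>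
    intro h1 h2 h3 h4 h5 q hq
    rw [computeLpsLoop, dif_pos hi, if_neg heq, if_pos hne]
    have hgd : lps.getD (length - 1) 0 = pvPi p length := by
      have h' := h2 (length - 1) (by omega) (by omega)
      rw [h']
      congr 1
      omega
    have hple : pvPi p length ≤ length - 1 := pvPi_le p length
    have hmin : min (lps.getD (length - 1) 0) (length - 1) = pvPi p length := by
      rw [hgd]; omega
    refine ih h1 h2 (by rw [hmin]; omega) ?_ ?_ q hq
    · rw [hmin]
      exact (pvPi_suffix p length).trans h4
    · rw [hmin]
      intro k hk1 hk2 hsuf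
      rcases lt_trichotomy k length with hkl | hkl | hkl
      · exfalso
        have hkk : p.take k <:+ p.take length := by
          apply suffix_of_suffix_le _ _ _ hsuf h4
          simp only [List.length_take]
          omega
        have := le_pvPi p length k (by omega) hkk
        omega
      · subst hkl
        intro hcontra
        exact heq hcontra.symm
      · exact h5 k hkl hk2 hsuf
  | case3 lps length i hi heq hne ih =>
    intro h1 h2 h3 h4 h5 q hq
    rw [computeLpsLoop, dif_pos hi, if_neg heq, if_neg hne]
    have hl0 : length = 0 := by omega
    subst hl0
    have hnob : ∀ k, 1 ≤ k → k ≤ i → ¬ p.take k <:+ p.take (i + 1) := by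
      intro k hk1 hk2 hsuf
      have hk' : k - 1 < p.length := by omega
      have hsuf' : p.take (k - 1 + 1) <:+ p.take (i + 1) := by
        have : k - 1 + 1 = k := by omega
        rw [this]
        exact hsuf
      obtain ⟨hs', hch⟩ := (take_succ_suffix p p (k - 1) i hk' hi).mp hsuf'
      by_cases hk0 : k - 1 = 0
      · rw [hk0] at hch
        exact heq hch.symm
      · exact h5 (k - 1) (by omega) (by omega) hs' hch
    have hpi0 : pvPi p (i + 1) = 0 := by
      by_contra hne0
      have hd := pvPi_le p (i + 1)
      exact hnob (pvPi p (i + 1)) (by omega) (by omega) (pvPi_suffix p (i + 1))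
    refine ih (by simp [h1]) ?_ (by omega) (by simp) ?_ q hq
    · intro q' hq1 hq2
      by_cases hqi : q' = i
      · subst hqi
        rw [List.getD_eq_getElem?_getD, List.getElem?_set_self (by omega), Option.getD_some, hpi0]
      · rw [List.getD_eq_getElem?_getD, List.getElem?_set_ne (by omega),
          ← List.getD_eq_getElem?_getD]
        exact h2 q' (by omega) hq2
    · intro k hk1 hk2 hsuf
      exact absurd hsuf (hnob k hk1 (by omega))
  | case4 lps length i hi =>
    intro h1 h2 h3 h4 h5 q hq
    rw [computeLpsLoop, dif_neg hi]
    exact h2 q (by omega) hq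

lemma lps_correct (p : List Char) :
    ∀ q, q < p.length → (compute_lps_array p).getD q 0 = pvPi p (q + 1) := by
  unfold compute_lps_array
  apply lpsLoop_correct p _ 0 1 (by simp)
  · intro q hq1 hq2
    have hq0 : q = 0 := by omega
    subst hq0
    rw [List.getD_eq_getElem?_getD, List.getElem?_replicate_of_lt (by omega), Option.getD_some]
    unfold pvPi
    rw [Nat.findGreatest_zero]
  · omega
  · simp
  · intro k hk1 hk2
    omega

lemma kmpLoop_correct (p m : List Char) (hp : p ≠ []) (lps : List Nat)
    (hl : ∀ q, q < p.length → lps.getD q 0 = pvPi p (q + 1)) :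
    ∀ i j acc, j < p.length → j ≤ i → i ≤ m.length →
      p.take j <:+ m.take i →
      (∀ k, j < k → k < p.length → p.take k <:+ m.take i → ¬ (p[k]? = m[i]?)) →
      kmpLoop p m lps i j acc = acc ++ endsAfter p m i := by
  have hplen : 0 < p.length := List.length_pos_iff.mpr hp
  intro i j acc
  induction i, j, acc using kmpLoop.induct p m lps with
  | case1 i j acc h0 =>
    intro hj hji him hJ4 hJ5
    exact absurd h0 (by omega)
  | case2 i j acc h0 hi hm hfull ih =>
    intro hj hji him hJ4 hJ5
    rw [kmpLoop, if_neg h0, dif_pos hi, if_pos hm, if_pos hfull]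
    have hmatch_ext : p.take (j + 1) <:+ m.take (i + 1) :=
      (take_succ_suffix p m j i hj hi).mpr ⟨hJ4, hm⟩
    have hfullmatch : p <:+ m.take (i + 1) := by
      have h' := hmatch_ext
      rw [hfull, List.take_length] at h'
      exact h'
    have hmax : ∀ k, k ≤ p.length → p.take k <:+ m.take (i + 1) → k ≤ j + 1 := by
      intro k hk hsuf
      match k with
      | 0 => omega
      | k' + 1 =>
        have hk' : k' < p.length := by omega
        obtain ⟨hs', hch⟩ := (take_succ_suffix p m k' i hk' hi).mp hsuf
        by_contra hgt
        exact hJ5 k' (by omega) (by omega) hs' hch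
    have hmin : min (lps.getD j 0) j = pvPi p (j + 1) := by
      rw [hl j hj]
      have := pvPi_le p (j + 1)
      omega
    have hrec := ih (by rw [hmin]; have := pvPi_le p (j + 1); omega)
      (by rw [hmin]; have := pvPi_le p (j + 1); omega) (by omega)
      (by rw [hmin]
          exact (pvPi_suffix p (j + 1)).trans hmatch_ext)
      (by rw [hmin]
          intro k hk1 hk2 hsuf
          exfalso
          have hkj : k ≤ j + 1 := hmax k (by omega) hsuf
          have hkk : p.take k <:+ p.take (j + 1) := by
            rw [hfull, List.take_length]
            exact suffix_of_suffix_le _ _ _ hsuf hfullmatch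
              (by simp only [List.length_take]; omega)
          have := le_pvPi p (j + 1) k (by omega) hkk
          omega)
    rw [hrec, endsAfter_step_some p m i hi hfullmatch]
    have hentry : ((i : Int) + 1 - ((j : Int) + 1), (p.length : Int),
        Option.map (fun c => String.ofList [c]) m[i + 1]?) = pvEntry p m (i + 1 - p.length) := by
      unfold pvEntry
      have h1 : ((i + 1 - p.length : Nat) : Int) = (i : Int) + 1 - ((j : Int) + 1) := by
        omega
      have h2 : i + 1 - p.length + p.length = i + 1 := by omega
      rw [h1, h2]
    rw [← hentry]
    simp
  | case3 i j acc h0 hi hm hnf helif ih =>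
    intro hj hji him hJ4 hJ5
    rw [kmpLoop, if_neg h0, dif_pos hi, if_pos hm, if_neg hnf, if_pos helif]
    have hj1 : j + 1 < p.length := by omega
    have hmatch_ext : p.take (j + 1) <:+ m.take (i + 1) :=
      (take_succ_suffix p m j i hj hi).mpr ⟨hJ4, hm⟩
    have hmax : ∀ k, k ≤ p.length → p.take k <:+ m.take (i + 1) → k ≤ j + 1 := by
      intro k hk hsuf
      match k with
      | 0 => omega
      | k' + 1 =>
        have hk' : k' < p.length := by omega
        obtain ⟨hs', hch⟩ := (take_succ_suffix p m k' i hk' hi).mp hsuf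
        by_contra hgt
        exact hJ5 k' (by omega) (by omega) hs' hch
    have hnomatch : ¬ p <:+ m.take (i + 1) := by
      intro hc
      have := hmax p.length le_rfl (by rw [List.take_length]; exact hc)
      omega
    have hmin : min (lps.getD j 0) j = pvPi p (j + 1) := by
      rw [hl j hj]
      have := pvPi_le p (j + 1)
      omega
    rw [← endsAfter_step_none p m i hnomatch] at *
    apply ih
    · rw [hmin]; have := pvPi_le p (j + 1); omega
    · rw [hmin]; have := pvPi_le p (j + 1); omega
    · omega
    · rw [hmin]
      exact (pvPi_suffix p (j + 1)).trans hmatch_ext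
    · rw [hmin]
      intro k hk1 hk2 hsuf
      have hkj : k ≤ j + 1 := hmax k (by omega) hsuf
      rcases lt_or_eq_of_le hkj with hlt | heq2
      · exfalso
        have hkk : p.take k <:+ p.take (j + 1) :=
          suffix_of_suffix_le _ _ _ hsuf hmatch_ext
            (by simp only [List.length_take]; omega)
        have := le_pvPi p (j + 1) k (by omega) hkk
        omega
      · subst heq2
        exact helif.2
  | case4 i j acc h0 hi hm hnf hnelif ih =>
    intro hj hji him hJ4 hJ5
    rw [kmpLoop, if_neg h0, dif_pos hi, if_pos hm, if_neg hnf, if_neg hnelif]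
    have hj1 : j + 1 < p.length := by omega
    have hmatch_ext : p.take (j + 1) <:+ m.take (i + 1) :=
      (take_succ_suffix p m j i hj hi).mpr ⟨hJ4, hm⟩
    have hmax : ∀ k, k ≤ p.length → p.take k <:+ m.take (i + 1) → k ≤ j + 1 := by
      intro k hk hsuf
      match k with
      | 0 => omega
      | k' + 1 =>
        have hk' : k' < p.length := by omega
        obtain ⟨hs', hch⟩ := (take_succ_suffix p m k' i hk' hi).mp hsuf
        by_contra hgt
        exact hJ5 k' (by omega) (by omega) hs' hch
    have hnomatch : ¬ p <:+ m.take (i + 1) := by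
      intro hc
      have := hmax p.length le_rfl (by rw [List.take_length]; exact hc)
      omega
    rw [← endsAfter_step_none p m i hnomatch] at *
    apply ih hj1 (by omega) (by omega) hmatch_ext
    intro k hk1 hk2 hsuf _
    have := hmax k (by omega) hsuf
    omega
  | case5 i acc h0 hi hm ih =>
    intro hj hji him hJ4 hJ5
    omega
  | case6 i j acc h0 hi hm hnj hj0 ih =>
    intro hj hji him hJ4 hJ5
    rw [kmpLoop, if_neg h0, dif_pos hi, if_neg hm, if_neg hnj, if_pos hj0]
    have hmin : min (lps.getD (j - 1) 0) (j - 1) = pvPi p j := by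
      have h' := hl (j - 1) (by omega)
      rw [show j - 1 + 1 = j from by omega] at h'
      rw [h']
      have := pvPi_le p j
      omega
    apply ih
    · rw [hmin]; have := pvPi_le p j; omega
    · rw [hmin]; have := pvPi_le p j; omega
    · omega
    · rw [hmin]
      exact (pvPi_suffix p j).trans hJ4
    · rw [hmin]
      intro k hk1 hk2 hsuf
      rcases lt_trichotomy k j with hkl | hkl | hkl
      · exfalso
        have hkk : p.take k <:+ p.take j :=
          suffix_of_suffix_le _ _ _ hsuf hJ4
            (by simp only [List.length_take]; omega)
        have := le_pvPi p j k (by omega) hkk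
        omega
      · subst hkl
        exact hm
      · exact hJ5 k hkl hk2 hsuf
  | case7 i j acc h0 hi hm hnj hj0 ih =>
    intro hj hji him hJ4 hJ5
    rw [kmpLoop, if_neg h0, dif_pos hi, if_neg hm, if_neg hnj, if_neg hj0]
    have hjz : j = 0 := by omega
    subst hjz
    have hstep : ∀ k, 1 ≤ k → k ≤ p.length → ¬ p.take k <:+ m.take (i + 1) := by
      intro k hk1 hk2 hsuf
      have hk' : k - 1 < p.length := by omega
      have hsuf' : p.take (k - 1 + 1) <:+ m.take (i + 1) := by
        rw [show k - 1 + 1 = k from by omega]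
        exact hsuf
      obtain ⟨hs', hch⟩ := (take_succ_suffix p m (k - 1) i hk' hi).mp hsuf'
      by_cases hk0 : k - 1 = 0
      · rw [hk0] at hch
        exact hm hch
      · exact hJ5 (k - 1) (by omega) (by omega) hs' hch
    have hnomatch : ¬ p <:+ m.take (i + 1) := by
      intro hc
      exact hstep p.length (by omega) le_rfl (by rw [List.take_length]; exact hc)
    rw [← endsAfter_step_none p m i hnomatch] at *
    apply ih hplen (by omega) (by omega) (by simp)
    intro k hk1 hk2 hsuf _
    exact hstep k (by omega) (by omega) hsuf
  | case8 i j acc h0 hi =>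
    intro hj hji him hJ4 hJ5
    rw [kmpLoop, if_neg h0, dif_neg hi]
    rw [show i = m.length from by omega, endsAfter_last, List.append_nil]

lemma perL_A (p m : List Char) (hp : p ≠ []) (acc : List (Int × Int × Option String)) :
    kmpLoop p m (compute_lps_array p) 0 0 acc = acc ++ endsAfter p m 0 := by
  have hplen : 0 < p.length := List.length_pos_iff.mpr hp
  apply kmpLoop_correct p m hp _ (lps_correct p) 0 0 acc hplen le_rfl (Nat.zero_le _) (by simp)
  intro k hk1 hk2 hsuf
  exfalso
  have h0 : p.take k = [] := by
    simpa using hsuf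
  have : (p.take k).length = 0 := by rw [h0]; rfl
  simp only [List.length_take] at this
  omega

lemma filter_map_eq_filterMap (l : List Nat) (q : Nat → Bool) (f : Nat → Int × Int × Option String) :
    (l.filter q).map f = l.filterMap (fun x => if q x then some (f x) else none) := by
  induction l with
  | nil => rfl
  | cons a t ih =>
    simp only [List.filter_cons, List.filterMap_cons]
    by_cases h : q a
    · simp [h, ih]
    · simp [h, ih]

lemma perL_B (p m : List Char) (hp : p ≠ []) (acc : List (Int × Int × Option String)) :
    (PySem.List.pyRange 0 ((m.length : Int) - (p.length : Int) + 1) 1).foldl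
      (fun occ start =>
        if PySem.List.slice m (some start) (some (start + (p.length : Int))) = p then
          occ ++ [(start, (p.length : Int),
                   if start + (p.length : Int) < (m.length : Int) then
                     (PySem.List.pyGet? m (start + (p.length : Int))).map (fun c => String.ofList [c])
                   else none)]
        else occ) acc = acc ++ endsAfter p m 0 := by
  have hp1 : 1 ≤ p.length := List.length_pos_iff.mpr hp
  have hn : ((m.length : Int) - (p.length : Int) + 1 - 0).toNat = m.length + 1 - p.length := by
    omega
  rw [PySem.List.pyRange_one, hn, List.foldl_map]
  have hstep : ∀ (occ : List (Int × Int × Option String)) (s : Nat),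
      s ∈ List.range (m.length + 1 - p.length) →
      (if PySem.List.slice m (some (0 + (s : Int))) (some (0 + (s : Int) + (p.length : Int))) = p
        then occ ++ [((0 + (s : Int)), (p.length : Int),
          if 0 + (s : Int) + (p.length : Int) < (m.length : Int) then
            (PySem.List.pyGet? m (0 + (s : Int) + (p.length : Int))).map (fun c => String.ofList [c])
          else none)]
        else occ) =
      (if (m.drop s).take p.length = p then occ ++ [pvEntry p m s] else occ) := by
    intro occ s hs
    rw [List.mem_range] at hs
    have hz : (0 : Int) + (s : Int) = (s : Int) := by ring
    rw [hz, PySem.List.slice_natCast_add]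
    by_cases hm1 : (m.drop s).take p.length = p
    · rw [if_pos hm1, if_pos hm1]
      have hcast : (s : Int) + (p.length : Int) = ((s + p.length : Nat) : Int) := by push_cast; ring
      have hthird : (if (s : Int) + (p.length : Int) < (m.length : Int) then
          (PySem.List.pyGet? m ((s : Int) + (p.length : Int))).map (fun c => String.ofList [c])
          else none) = (m[s + p.length]?).map (fun c => String.ofList [c]) := by
        rw [hcast, PySem.List.pyGet?_natCast]
        by_cases hlt : s + p.length < m.length
        · rw [if_pos (by exact_mod_cast hlt)]
        · rw [if_neg (by exact_mod_cast hlt), List.getElem?_eq_none (by omega), Option.map_none]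
      rw [hthird]
      rfl
    · rw [if_neg hm1, if_neg hm1]
  rw [PySem.List.foldl_congr_mem _ _ _ _ hstep,
    PySem.List.foldl_append_ite (p := fun s => (m.drop s).take p.length = p) (f := pvEntry p m),
    filter_map_eq_filterMap]
  unfold endsAfter
  congr 1
  apply List.filterMap_congr
  intro s hs
  by_cases hm1 : (m.drop s).take p.length = p
  · rw [if_pos (by simpa using hm1), if_pos ⟨by omega, hm1⟩]
  · rw [if_neg (by simpa using hm1), if_neg (by rintro ⟨-, hh⟩; exact hm1 hh)]

lemma suffix_nonempty (S : String) (L : Int) (hS : S ≠ "")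
    (hL : -(S.toList.length : Int) < L) :
    PySem.List.slice S.toList (some (-L)) none ≠ [] := by
  have hne : S.toList ≠ [] := by
    intro h
    apply hS
    have := congrArg String.ofList h
    simpa using this
  have hpos : 0 < S.toList.length := List.length_pos_iff.mpr hne
  rw [PySem.List.slice_some_none]
  intro hnil
  rw [List.drop_eq_nil_iff] at hnil
  have hle : PySem.List.clampIdx S.toList.length (-L) < S.toList.length := by
    simp only [PySem.List.clampIdx]
    split_ifs <;> omega
  omega

-- ===== VERDICT (by name: the statement is the Claim_ definition above) =====
theorem find_suffixes_in_sequence_spec : Claim_equal_find_suffixes_in_sequence := by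
  intro S M S_min S_max _ hpre
  unfold Spec_find_suffixes_in_sequence
  unfold find_suffixes_in_sequence find_suffixes_in_sequence_alt
  rcases hpre with hlt | ⟨hS, hlen⟩
  · have hr : PySem.List.pyRange S_min (S_max + 1) 1 = [] := by
      rw [PySem.List.pyRange_one, show (S_max + 1 - S_min).toNat = 0 from by omega]
      rfl
    rw [hr]
    rfl
  · refine Eq.trans (PySem.List.foldl_congr_mem _ _ (fun occ L =>
        occ ++ endsAfter (PySem.List.slice S.toList (some (-L)) none) M.toList 0) _ ?_)
      (Eq.symm (PySem.List.foldl_congr_mem _ _ (fun occ L =>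
        occ ++ endsAfter (PySem.List.slice S.toList (some (-L)) none) M.toList 0) _ ?_))
    · intro occ L hLmem
      have hge : S_min ≤ L := ((PySem.List.mem_pyRange_one).mp hLmem).1
      have hne := suffix_nonempty S L hS (by omega)
      dsimp only
      exact perL_A _ _ hne occ
    · intro occ L hLmem
      have hge : S_min ≤ L := ((PySem.List.mem_pyRange_one).mp hLmem).1
      have hne := suffix_nonempty S L hS (by omega)
      dsimp only
      exact perL_B _ _ hne occ
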